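-- pv_equiv track=rewrite | github.com/mcmullarkey/advent-of-code-2024 | 01/solution.py | calculate_similarity_score
-- ===== SOURCE A (Python) =====
-- from collections import Counter
--
-- def calculate_similarity_score(location_lists):
--
--     # Get unique values in left list
--
--     unique_values = list(set(location_lists[0]))
--
--     # Count the number of times each unique value in left list appears in right list
--
--     # Count occurrences of all items in the list
--     counts = Counter(location_lists[1])
--
--     # Filter counts to include only items in the set
--     filtered_counts = {key: counts[key] for key in unique_values}
--
--     # Sum up similarity scores while using original left list with duplicate values
--
--     similarity_score_list = [location_id * filtered_counts.get(location_id, 0)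
--                              for location_id
--                              in location_lists[0]]
--
--     part_two_answer = sum(similarity_score_list)
--
--     return part_two_answer
-- ===== SOURCE B (Python) =====
-- def calculate_similarity_score(location_lists):
--     left = sorted(location_lists[0])
--     right = sorted(location_lists[1])
--     total = 0
--     j = 0
--     n = len(right)
--     for v in left:
--         while j < n and right[j] < v:
--             j += 1
--         k = j
--         while k < n and right[k] == v:
--             k += 1
--         total += v * (k - j)
--     return total
-- ===== Notes on version B (the rewrite author's own statement) =====
-- stated objective: alternative
-- what changed: Replaces the set/Counter/dict pipeline by sorting both lists and a two-pointer merge that counts each left value's run in the sorted right list, accumulating value*count directly.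
import Mathlib
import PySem

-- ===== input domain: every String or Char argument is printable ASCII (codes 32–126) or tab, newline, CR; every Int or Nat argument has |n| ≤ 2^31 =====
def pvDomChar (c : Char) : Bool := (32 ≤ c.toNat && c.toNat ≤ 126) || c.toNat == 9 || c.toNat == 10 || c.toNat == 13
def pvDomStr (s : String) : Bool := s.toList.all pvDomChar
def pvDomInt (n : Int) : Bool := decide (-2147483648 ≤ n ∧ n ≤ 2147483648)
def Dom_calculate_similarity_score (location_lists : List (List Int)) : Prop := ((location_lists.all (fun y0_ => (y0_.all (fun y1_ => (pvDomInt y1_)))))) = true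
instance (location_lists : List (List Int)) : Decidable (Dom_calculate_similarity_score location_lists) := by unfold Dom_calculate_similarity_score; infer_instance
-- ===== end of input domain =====

-- B replaces A's set/Counter/dict pipeline by sorting both lists and a two-pointer
-- merge counting each left value's run in the sorted right list (alternative algorithm).

-- ===== PORT A =====
def calculate_similarity_score (location_lists : List (List Int)) : Int :=
  let left := PySem.List.pyGetD location_lists 0 []
  let right := PySem.List.pyGetD location_lists 1 []
  -- unique_values = list(set(location_lists[0])) — consumed only to build a dict later looked up, order-independent
  let unique_values : PySem.Set Int := PySem.Set.ofList left
  -- counts = Counter(location_lists[1])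
  let counts := PySem.Dict.counter right
  -- filtered_counts = {key: counts[key] for key in unique_values}
  let filtered_counts := unique_values.foldl (fun d k => d.insert k (counts.getD k 0)) PySem.Dict.empty
  -- sum of the similarity-score list comprehension
  (left.map (fun location_id => location_id * filtered_counts.getD location_id 0)).sum

-- ===== PORT B =====
-- while j < n and right[j] < v: j += 1   (the suffix from j onward)
def pvSkip (v : Int) : List Int → List Int
  | [] => []
  | x :: xs => if x < v then pvSkip v xs else x :: xs

-- k = j; while k < n and right[k] == v: k += 1; k - j   (length of the equal run)
def pvRun (v : Int) : List Int → Nat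
  | [] => 0
  | x :: xs => if x = v then pvRun v xs + 1 else 0

-- the for-loop over left, carrying the right suffix (pointer j) and the total
def pvLoop : List Int → List Int → Int → Int
  | [], _, total => total
  | v :: ls, r, total =>
    let r' := pvSkip v r
    pvLoop ls r' (total + v * (pvRun v r' : Int))

def calculate_similarity_score_alt (location_lists : List (List Int)) : Int :=
  let left := PySem.List.sorted (PySem.List.pyGetD location_lists 0 []) (fun x => x) false
  let right := PySem.List.sorted (PySem.List.pyGetD location_lists 1 []) (fun x => x) false
  pvLoop left right 0

-- ===== PRECONDITION & SPEC =====
-- Pre_ excludes exactly the inputs with fewer than two inner lists, on which A raises IndexError.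
def Pre_calculate_similarity_score (location_lists : List (List Int)) : Prop :=
  2 ≤ location_lists.length
instance (location_lists : List (List Int)) : Decidable (Pre_calculate_similarity_score location_lists) := by unfold Pre_calculate_similarity_score; infer_instance

def pvWitness_calculate_similarity_score : List (List Int) := [[1, 2, 2], [2, 2, 3]]

def Spec_calculate_similarity_score (location_lists : List (List Int)) (out : Int) : Prop := out = calculate_similarity_score_alt location_lists
instance (location_lists : List (List Int)) (out : Int) : Decidable (Spec_calculate_similarity_score location_lists out) := by unfold Spec_calculate_similarity_score; infer_instance

-- ===== CLAIM =====
def Claim_equal_calculate_similarity_score : Prop := ∀ (location_lists : List (List Int)), Dom_calculate_similarity_score location_lists → Pre_calculate_similarity_score location_lists → Spec_calculate_similarity_score location_lists (calculate_similarity_score location_lists)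

-- ===== LEMMAS AND PROOFS =====

-- looking up x in a dict built by inserting f k for keys not containing x leaves getD unchanged
theorem pv_getD_fold_not_mem (f : Int → Int) (ks : List Int) (x : Int) (hx : x ∉ ks)
    (d : PySem.Dict Int Int) :
    (ks.foldl (fun d k => d.insert k (f k)) d).getD x 0 = d.getD x 0 := by
  induction ks generalizing d with
  | nil => rfl
  | cons k ks ih =>
    simp only [List.mem_cons, not_or] at hx
    simp only [List.foldl_cons]
    rw [ih hx.2, PySem.Dict.getD_insert_of_ne _ _ _ hx.1]

-- looking up x ∈ ks in the dict built from distinct keys ks gives f x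
theorem pv_getD_fold_mem (f : Int → Int) (ks : List Int) (x : Int) (hnd : ks.Nodup)
    (hx : x ∈ ks) (d : PySem.Dict Int Int) :
    (ks.foldl (fun d k => d.insert k (f k)) d).getD x 0 = f x := by
  induction ks generalizing d with
  | nil => cases hx
  | cons k ks ih =>
    simp only [List.nodup_cons] at hnd
    simp only [List.foldl_cons]
    rcases List.mem_cons.mp hx with h | h
    · subst h
      rw [pv_getD_fold_not_mem f ks x hnd.1, PySem.Dict.getD_insert_self]
    · exact ih hnd.2 h _

-- A computes the sum of x * right.count x over the left list
theorem pv_A_eq (location_lists : List (List Int)) :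
    calculate_similarity_score location_lists =
      ((PySem.List.pyGetD location_lists 0 []).map
        (fun x => x * ((PySem.List.pyGetD location_lists 1 []).count x : Int))).sum := by
  simp only [calculate_similarity_score]
  congr 1
  apply List.map_congr_left
  intro x hx
  have hmem : x ∈ PySem.Set.ofList (PySem.List.pyGetD location_lists 0 []) :=
    (PySem.Set.mem_ofList _ _).mpr hx
  rw [pv_getD_fold_mem _ _ _ (PySem.Set.nodup_ofList _) hmem, PySem.Dict.getD_counter]

theorem pv_skip_count (v w : Int) (h : v ≤ w) (r : List Int) :
    (pvSkip v r).count w = r.count w := by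
  induction r with
  | nil => rfl
  | cons x xs ih =>
    simp only [pvSkip]
    split_ifs with hx
    · rw [ih, List.count_cons_of_ne (by omega)]
    · rfl

theorem pv_skip_sorted (v : Int) (r : List Int) (h : r.Pairwise (· ≤ ·)) :
    (pvSkip v r).Pairwise (· ≤ ·) := by
  induction r with
  | nil => exact h
  | cons x xs ih =>
    rw [List.pairwise_cons] at h
    simp only [pvSkip]
    split_ifs with hx
    · exact ih h.2
    · exact List.pairwise_cons.mpr h

theorem pv_skip_ge (v : Int) (r : List Int) (h : r.Pairwise (· ≤ ·)) :
    ∀ x ∈ pvSkip v r, v ≤ x := by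
  induction r with
  | nil => intro x hx; cases hx
  | cons y ys ih =>
    rw [List.pairwise_cons] at h
    simp only [pvSkip]
    split_ifs with hy
    · exact ih h.2
    · intro x hx
      rcases List.mem_cons.mp hx with rfl | hx
      · omega
      · exact le_trans (by omega) (h.1 x hx)

theorem pv_run_count (v : Int) (r : List Int) (hge : ∀ x ∈ r, v ≤ x)
    (hs : r.Pairwise (· ≤ ·)) : (pvRun v r : Int) = r.count v := by
  induction r with
  | nil => rfl
  | cons x xs ih =>
    rw [List.pairwise_cons] at hs
    simp only [pvRun]
    split_ifs with hx
    · subst hx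
      rw [List.count_cons_self]
      push_cast
      rw [ih (fun y hy => hge y (List.mem_cons_of_mem _ hy)) hs.2]
    · have hvx : v < x := lt_of_le_of_ne (hge x (List.mem_cons_self)) (Ne.symm hx)
      have : (x :: xs).count v = 0 := by
        rw [List.count_eq_zero]
        intro hv
        rcases List.mem_cons.mp hv with rfl | hv
        · omega
        · have := hs.1 v hv; omega
      rw [this]

theorem pv_loop_spec (l : List Int) : ∀ (r : List Int) (total : Int),
    l.Pairwise (· ≤ ·) → r.Pairwise (· ≤ ·) →
    pvLoop l r total = total + (l.map (fun x => x * (r.count x : Int))).sum := by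
  induction l with
  | nil => intro r total _ _; simp [pvLoop]
  | cons v ls ih =>
    intro r total hl hr
    rw [List.pairwise_cons] at hl
    simp only [pvLoop]
    have hr' : (pvSkip v r).Pairwise (· ≤ ·) := pv_skip_sorted v r hr
    rw [ih (pvSkip v r) _ hl.2 hr']
    have hrun : (pvRun v (pvSkip v r) : Int) = r.count v := by
      rw [pv_run_count v _ (pv_skip_ge v r hr) hr', pv_skip_count v v le_rfl]
    have hmap : ls.map (fun x => x * ((pvSkip v r).count x : Int)) =
        ls.map (fun x => x * (r.count x : Int)) := by
      apply List.map_congr_left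
      intro x hx
      rw [pv_skip_count v x (hl.1 x hx)]
    rw [hrun, hmap]
    simp only [List.map_cons, List.sum_cons]
    ring

-- B computes the same sum, over the sorted lists
theorem pv_B_eq (location_lists : List (List Int)) :
    calculate_similarity_score_alt location_lists =
      ((PySem.List.pyGetD location_lists 0 []).map
        (fun x => x * ((PySem.List.pyGetD location_lists 1 []).count x : Int))).sum := by
  simp only [calculate_similarity_score_alt]
  rw [pv_loop_spec _ _ _ (PySem.List.sorted_pairwise _ _)
    (PySem.List.sorted_pairwise _ _), zero_add]
  have hcnt : ∀ x : Int,
      (PySem.List.sorted (PySem.List.pyGetD location_lists 1 []) (fun x => x) false).count x =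
      (PySem.List.pyGetD location_lists 1 []).count x :=
    fun x => (PySem.List.sorted_perm _ _ _).count_eq x
  calc ((PySem.List.sorted (PySem.List.pyGetD location_lists 0 []) (fun x => x) false).map
        (fun x => x * ((PySem.List.sorted (PySem.List.pyGetD location_lists 1 []) (fun x => x) false).count x : Int))).sum
      = ((PySem.List.sorted (PySem.List.pyGetD location_lists 0 []) (fun x => x) false).map
        (fun x => x * ((PySem.List.pyGetD location_lists 1 []).count x : Int))).sum := by
        congr 1
        apply List.map_congr_left
        intro x _
        rw [hcnt x]
    _ = _ := ((PySem.List.sorted_perm _ _ _).map _).sum_eq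

-- ===== VERDICT =====
theorem calculate_similarity_score_spec : Claim_equal_calculate_similarity_score := by
  intro location_lists _ _
  unfold Spec_calculate_similarity_score
  rw [pv_A_eq, pv_B_eq]
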